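-- pv_equiv track=rewrite | github.com/boostcampaitech7/level2-bookratingprediction-recsys-03 | src/data/context_data.py | extract_language_from_isbn
-- ===== SOURCE A (Python) =====
-- def extract_language_from_isbn(isbn):
--     """
--     ISBN 정보를 사용하여 언어 코드를 추출하는 함수입니다.
--
--     Parameters
--     ----------
--     isbn : str
--         책의 ISBN 번호.
--
--     Returns
--     -------
--     str
--         ISBN에서 추출한 언어 코드. ISBN이 비어있거나 형식에 맞지 않을 경우 최빈값 'en'을 반환합니다.
--         - isbn_language_map 참고
--         - 기타 언어 코드: isbn_language_map에 정의된 국가 코드를 기반으로 반환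
--     """
--     isbn_language_map = {
--         '0': 'en', '1': 'en', '2': 'fr', '3': 'de', '4': 'ja',
--         '5': 'ru', '7': 'zh-CN', '82': 'no', '84': 'es', '87': 'da',
--         '88': 'it', '89': 'ko', '94': 'nl', '600': 'fa', '602': 'ms',
--         '606': 'ro', '604': 'vi', '618': 'el', '967': 'ms', '974': 'th',
--         '989': 'pt'
--     }
--     # isbn_language_map = {
--     #     '0': 'en', '1': 'en', '2': 'fr', '3': 'de', '4': 'ja', '5': 'ru', '7': 'zh-CN',
--     #     '82': 'no', '84': 'es', '87': 'da', '88': 'it',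
--     #     '602': 'ms', '967': 'ms', '974': 'th'
--     #     #'89': 'ko', '94': 'nl', # '600': 'fa', '604': 'vi', '606': 'ro', '618': 'el', '989': 'pt'
--     # }
--     if not isbn or not isbn.isdigit():
--         return 'en'  # 기본값 영어권
--     for prefix, language in isbn_language_map.items():
--         if isbn.startswith(prefix):
--             return language
--     return 'en'  # 기본값 영어권
-- ===== SOURCE B (Python) =====
-- def extract_language_from_isbn(isbn):
--     """Idiomatic rewrite: direct keyed lookups at prefix lengths 1..3 instead of scanning all entries."""
--     isbn_language_map = {
--         '0': 'en', '1': 'en', '2': 'fr', '3': 'de', '4': 'ja',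
--         '5': 'ru', '7': 'zh-CN', '82': 'no', '84': 'es', '87': 'da',
--         '88': 'it', '89': 'ko', '94': 'nl', '600': 'fa', '602': 'ms',
--         '606': 'ro', '604': 'vi', '618': 'el', '967': 'ms', '974': 'th',
--         '989': 'pt'
--     }
--     if not isbn or not isbn.isdigit():
--         return 'en'
--     for n in (1, 2, 3):
--         language = isbn_language_map.get(isbn[:n])
--         if language is not None:
--             return language
--     return 'en'
-- ===== Notes on version B (the rewrite author's own statement) =====
-- stated objective: idiomatic
-- what changed: Replaced the linear scan over all 21 map entries with startswith by three direct dict lookups keyed on isbn[:1], isbn[:2], isbn[:3]; probing in increasing prefix length reproduces the original first-match order because no key is a proper prefix of another key.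
import Mathlib
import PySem

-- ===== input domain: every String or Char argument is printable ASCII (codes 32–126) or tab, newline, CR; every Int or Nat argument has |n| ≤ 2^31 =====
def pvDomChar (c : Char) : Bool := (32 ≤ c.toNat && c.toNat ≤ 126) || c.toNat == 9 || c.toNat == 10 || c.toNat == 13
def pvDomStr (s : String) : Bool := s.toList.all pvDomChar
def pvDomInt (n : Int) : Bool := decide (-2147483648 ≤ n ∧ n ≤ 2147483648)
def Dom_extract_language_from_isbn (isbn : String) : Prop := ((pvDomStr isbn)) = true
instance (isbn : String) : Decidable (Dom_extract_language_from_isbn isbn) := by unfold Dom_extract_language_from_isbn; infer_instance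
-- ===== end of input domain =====

-- B replaces A's linear scan of the 21-entry map (startswith on each key) by three direct
-- keyed lookups at prefix lengths 1, 2, 3; probing in increasing length reproduces A's
-- insertion-order first match exactly (no key of the map is a proper prefix of another key).

-- ===== PORT A =====
def pvIsbnMap : List (String × String) :=
  [("0", "en"), ("1", "en"), ("2", "fr"), ("3", "de"), ("4", "ja"),
   ("5", "ru"), ("7", "zh-CN"), ("82", "no"), ("84", "es"), ("87", "da"),
   ("88", "it"), ("89", "ko"), ("94", "nl"), ("600", "fa"), ("602", "ms"),
   ("606", "ro"), ("604", "vi"), ("618", "el"), ("967", "ms"), ("974", "th"),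
   ("989", "pt")]

-- the 'for prefix, language in isbn_language_map.items()' loop with its early return
def pvALoop (isbn : String) : List (String × String) → String
  | [] => "en"
  | (prefixKey, language) :: rest =>
      if PySem.Str.startswith isbn prefixKey then language else pvALoop isbn rest

def extract_language_from_isbn (isbn : String) : String :=
  if isbn == "" || !(PySem.Str.strIsdigit isbn) then "en"
  else pvALoop isbn (PySem.Dict.ofList pvIsbnMap).items

-- ===== PORT B =====
def pvBDict : PySem.Dict String String := PySem.Dict.ofList pvIsbnMap

-- the 'for n in (1, 2, 3)' loop of Source B, unrolled: probe isbn[:1], isbn[:2], isbn[:3]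
def extract_language_from_isbn_alt (isbn : String) : String :=
  if isbn == "" || !(PySem.Str.strIsdigit isbn) then "en"
  else
    match pvBDict.get? (PySem.Str.slice isbn none (some 1)) with
    | some language => language
    | none =>
      match pvBDict.get? (PySem.Str.slice isbn none (some 2)) with
      | some language => language
      | none =>
        match pvBDict.get? (PySem.Str.slice isbn none (some 3)) with
        | some language => language
        | none => "en"

-- ===== PRECONDITION & SPEC =====
def Spec_extract_language_from_isbn (isbn : String) (out : String) : Prop := out = extract_language_from_isbn_alt isbn
instance (isbn : String) (out : String) : Decidable (Spec_extract_language_from_isbn isbn out) := by unfold Spec_extract_language_from_isbn; infer_instance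

-- ===== CLAIM (what is proved, stated in full; the proofs are below) =====
def Claim_equal_extract_language_from_isbn : Prop := ∀ (isbn : String), Dom_extract_language_from_isbn isbn → Spec_extract_language_from_isbn isbn (extract_language_from_isbn isbn)

-- ===== LEMMAS AND PROOFS =====

theorem digit_mem (c : Char) (h : PySem.Chars.isdigit c = true) :
    c ∈ ['0','1','2','3','4','5','6','7','8','9'] := by
  simp only [PySem.Chars.isdigit, Bool.and_eq_true, decide_eq_true_eq, Char.le_def] at h
  obtain ⟨h1, h2⟩ := h
  have hv1 : 48 ≤ c.toNat := by exact_mod_cast h1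
  have hv2 : c.toNat ≤ 57 := by exact_mod_cast h2
  have hc : Char.ofNat c.toNat = c := Char.ofNat_toNat c
  rw [← hc]
  interval_cases hn : c.toNat <;> decide

theorem items_ofList : (PySem.Dict.ofList pvIsbnMap).items = pvIsbnMap := by rfl

-- a string starting with one of the seven single-digit keys: A's scan hits that key first,
-- B's first probe finds it; both return the mapped language whatever follows
set_option maxHeartbeats 1600000 in
theorem hit_single (t : List Char) : ∀ a ∈ (['0','1','2','3','4','5','7'] : List Char),
    extract_language_from_isbn (String.ofList (a :: t)) =
      extract_language_from_isbn_alt (String.ofList (a :: t)) := by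
  intro a ha
  unfold extract_language_from_isbn extract_language_from_isbn_alt
  rw [items_ofList]
  fin_cases ha <;>
    [ (have h1 : PySem.Str.slice (String.ofList ('0'::t)) none (some 1) = "0" := by
         simp [PySem.Str.slice, pysem]
       rw [h1, show pvBDict.get? "0" = some "en" from rfl]);
      (have h1 : PySem.Str.slice (String.ofList ('1'::t)) none (some 1) = "1" := by
         simp [PySem.Str.slice, pysem]
       rw [h1, show pvBDict.get? "1" = some "en" from rfl]);
      (have h1 : PySem.Str.slice (String.ofList ('2'::t)) none (some 1) = "2" := by
         simp [PySem.Str.slice, pysem]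
       rw [h1, show pvBDict.get? "2" = some "fr" from rfl]);
      (have h1 : PySem.Str.slice (String.ofList ('3'::t)) none (some 1) = "3" := by
         simp [PySem.Str.slice, pysem]
       rw [h1, show pvBDict.get? "3" = some "de" from rfl]);
      (have h1 : PySem.Str.slice (String.ofList ('4'::t)) none (some 1) = "4" := by
         simp [PySem.Str.slice, pysem]
       rw [h1, show pvBDict.get? "4" = some "ja" from rfl]);
      (have h1 : PySem.Str.slice (String.ofList ('5'::t)) none (some 1) = "5" := by
         simp [PySem.Str.slice, pysem]
       rw [h1, show pvBDict.get? "5" = some "ru" from rfl]);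
      (have h1 : PySem.Str.slice (String.ofList ('7'::t)) none (some 1) = "7" := by
         simp [PySem.Str.slice, pysem]
       rw [h1, show pvBDict.get? "7" = some "zh-CN" from rfl]) ] <;>
    simp [pvIsbnMap, pvALoop, PySem.Str.startswith_eq, PySem.Chars.startswith, List.isPrefixOf]

-- A's loop result only depends on what startswith answers on the keys
theorem aloop_congr (s1 s2 : String) (l : List (String × String))
    (h : ∀ pr ∈ l, PySem.Str.startswith s1 pr.1 = PySem.Str.startswith s2 pr.1) :
    pvALoop s1 l = pvALoop s2 l := by
  induction l with
  | nil => rfl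
  | cons hd tl ih =>
      obtain ⟨p, lang⟩ := hd
      simp only [pvALoop, h (p, lang) (List.mem_cons_self ..)]
      split
      · rfl
      · exact ih fun pr hpr => h pr (List.mem_cons_of_mem _ hpr)

-- a prefix test by a pattern of length ≤ 3 reads at most the first three characters
theorem prefix3 (a b c : Char) (t : List Char) (p : List Char) (hp : p.length ≤ 3) :
    List.isPrefixOf p (a :: b :: c :: t) = List.isPrefixOf p [a, b, c] := by
  match p, hp with
  | [], _ => rfl
  | [x], _ => simp [List.isPrefixOf]
  | [x, y], _ => simp [List.isPrefixOf]
  | [x, y, z], _ => simp [List.isPrefixOf]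

-- both programs read at most the first three characters of an all-digit string
set_option maxHeartbeats 1600000 in
theorem a_take3 (a b c : Char) (t : List Char)
    (h : PySem.Str.strIsdigit (String.ofList (a :: b :: c :: t)) = true) :
    extract_language_from_isbn (String.ofList (a :: b :: c :: t)) =
      extract_language_from_isbn (String.ofList [a, b, c]) := by
  unfold extract_language_from_isbn
  have h3 : PySem.Str.strIsdigit (String.ofList [a, b, c]) = true := by
    simp [PySem.Chars.strIsdigit] at h ⊢; tauto
  have g1 : ((String.ofList (a :: b :: c :: t)) == "") = false := by
    simp [beq_eq_false_iff_ne, ← String.toList_inj]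
  have g2 : ((String.ofList [a, b, c]) == "") = false := by
    simp [beq_eq_false_iff_ne, ← String.toList_inj]
  rw [items_ofList]
  simp only [h, h3, g1, g2, Bool.not_true, Bool.or_false]
  apply aloop_congr
  intro pr hpr
  have hlen : pr.1.toList.length ≤ 3 := by fin_cases hpr <;> decide
  simp only [PySem.Str.startswith_eq, PySem.Chars.startswith, String.toList_ofList]
  exact prefix3 a b c t _ hlen

set_option maxHeartbeats 1600000 in
theorem b_take3 (a b c : Char) (t : List Char)
    (h : PySem.Str.strIsdigit (String.ofList (a :: b :: c :: t)) = true) :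
    extract_language_from_isbn_alt (String.ofList (a :: b :: c :: t)) =
      extract_language_from_isbn_alt (String.ofList [a, b, c]) := by
  unfold extract_language_from_isbn_alt
  have h3 : PySem.Str.strIsdigit (String.ofList [a, b, c]) = true := by
    simp [PySem.Chars.strIsdigit] at h ⊢; tauto
  have g1 : ((String.ofList (a :: b :: c :: t)) == "") = false := by
    simp [beq_eq_false_iff_ne, ← String.toList_inj]
  have g2 : ((String.ofList [a, b, c]) == "") = false := by
    simp [beq_eq_false_iff_ne, ← String.toList_inj]
  have e1 : PySem.Str.slice (String.ofList (a::b::c::t)) none (some 1) = String.ofList [a] := by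
    rw [← String.toList_inj, PySem.Str.toList_slice]; simp [pysem]
  have e2 : PySem.Str.slice (String.ofList (a::b::c::t)) none (some 2) = String.ofList [a,b] := by
    rw [← String.toList_inj, PySem.Str.toList_slice]; simp [pysem]
  have e3 : PySem.Str.slice (String.ofList (a::b::c::t)) none (some 3) = String.ofList [a,b,c] := by
    rw [← String.toList_inj, PySem.Str.toList_slice]; simp [pysem]
  have f1 : PySem.Str.slice (String.ofList [a,b,c]) none (some 1) = String.ofList [a] := by
    rw [← String.toList_inj, PySem.Str.toList_slice]; simp [pysem]
  have f2 : PySem.Str.slice (String.ofList [a,b,c]) none (some 2) = String.ofList [a,b] := by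
    rw [← String.toList_inj, PySem.Str.toList_slice]; simp [pysem]
  have f3 : PySem.Str.slice (String.ofList [a,b,c]) none (some 3) = String.ofList [a,b,c] := by
    rw [← String.toList_inj, PySem.Str.toList_slice]; simp [pysem]
  rw [e1, e2, e3, f1, f2, f3]
  simp only [h, h3, g1, g2, Bool.not_true, Bool.or_false]

-- the remaining digit strings of length 1..3 (first digit 6, 8 or 9), checked exhaustively
def pvDigits : List Char := ['0','1','2','3','4','5','6','7','8','9']

def pvChkRest : Bool :=
  (['6','8','9'] : List Char).all fun a =>
    (extract_language_from_isbn (String.ofList [a]) == extract_language_from_isbn_alt (String.ofList [a])) &&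
    (pvDigits.all fun b =>
      (extract_language_from_isbn (String.ofList [a, b]) == extract_language_from_isbn_alt (String.ofList [a, b])) &&
      (pvDigits.all fun c =>
        extract_language_from_isbn (String.ofList [a, b, c]) == extract_language_from_isbn_alt (String.ofList [a, b, c])))

set_option maxRecDepth 100000 in
set_option maxHeartbeats 4000000 in
theorem chkRest_true : pvChkRest = true := by rfl

theorem miss_rest (a : Char) (hmiss : a ∈ (['6','8','9'] : List Char)) (t : List Char)
    (hdig : PySem.Str.strIsdigit (String.ofList (a :: t)) = true)
    (hrest : ∀ x ∈ t, PySem.Chars.isdigit x = true) :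
    extract_language_from_isbn (String.ofList (a :: t)) =
      extract_language_from_isbn_alt (String.ofList (a :: t)) := by
  have hall := chkRest_true
  unfold pvChkRest at hall
  simp only [List.all_eq_true] at hall
  obtain ⟨h1, h2⟩ := Bool.and_eq_true_iff.mp (hall a hmiss)
  cases t with
  | nil => exact eq_of_beq h1
  | cons b u =>
      have hb : b ∈ pvDigits := digit_mem b (hrest b (List.mem_cons_self ..))
      obtain ⟨hb1, hb2⟩ := Bool.and_eq_true_iff.mp (List.all_eq_true.mp h2 b hb)
      cases u with
      | nil => exact eq_of_beq hb1
      | cons c v =>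
          have hc : c ∈ pvDigits :=
            digit_mem c (hrest c (List.mem_cons_of_mem _ (List.mem_cons_self ..)))
          rw [a_take3 a b c v hdig, b_take3 a b c v hdig]
          exact eq_of_beq (List.all_eq_true.mp hb2 c hc)

-- ===== VERDICT (by name: the statement is the Claim_ definition above) =====
set_option maxRecDepth 8000 in
set_option maxHeartbeats 4000000 in
theorem extract_language_from_isbn_spec : Claim_equal_extract_language_from_isbn := by
  intro isbn _
  unfold Spec_extract_language_from_isbn
  by_cases hg : (isbn == "" || !(PySem.Str.strIsdigit isbn)) = true
  · unfold extract_language_from_isbn extract_language_from_isbn_alt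
    rw [if_pos hg, if_pos hg]
  · have hgf : (isbn == "" || !(PySem.Str.strIsdigit isbn)) = false := by
      revert hg; cases (isbn == "" || !(PySem.Str.strIsdigit isbn)) <;> simp
    have hdig : PySem.Str.strIsdigit isbn = true := by
      rcases Bool.or_eq_false_iff.mp hgf with ⟨_, h2⟩
      simpa using h2
    obtain ⟨l, rfl⟩ : ∃ l, String.ofList l = isbn := ⟨isbn.toList, String.ofList_toList⟩
    have hdl : PySem.Chars.strIsdigit l = true := by simpa using hdig
    have hnil : l ≠ [] := by
      intro hO; rw [hO] at hdl; exact absurd hdl (by decide)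
    obtain ⟨a, t, rfl⟩ : ∃ a t, a :: t = l := by
      cases l with
      | nil => exact absurd rfl hnil
      | cons a t => exact ⟨a, t, rfl⟩
    have ha : a ∈ ['0','1','2','3','4','5','6','7','8','9'] := by
      apply digit_mem
      simp only [PySem.Chars.strIsdigit, Bool.and_eq_true, List.all_cons] at hdl
      exact hdl.2.1
    have hrest : ∀ x ∈ t, PySem.Chars.isdigit x = true := by
      simp only [PySem.Chars.strIsdigit, Bool.and_eq_true, List.all_cons, List.all_eq_true] at hdl
      exact hdl.2.2
    -- dispatch on the first digit: seven single-character keys hit for any tail,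
    -- the rest (6, 8, 9) is decided by the first three characters
    fin_cases ha <;>
      first
        | exact hit_single t _ (by decide)
        | exact miss_rest _ (by decide) t hdig hrest
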